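-- pv_equiv track=rewrite | github.com/KosuriLab/DropSynth | Primerselectiontools_py3.py | avoidedSeqsInOverlapRegions
-- ===== SOURCE A (Python) =====
-- def avoidedSeqsInOverlapRegions(seq, primers, seqsToAvoid, coordsOfAvoidedRegionsInSeq):
--     # prevents specified sequences from touching the overlap regions
--     newprimers = []
--     for primer in primers:
--         addPrimer = True
--         coords = primer[1]
--         for avoidedCoords in coordsOfAvoidedRegionsInSeq:
--             if (coords[0] >= avoidedCoords[0] and coords[0] <= avoidedCoords[1]) or (coords[1] >= avoidedCoords[0] and coords[1] <= avoidedCoords[1]):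
--                 # if the start point of the primer is inside an avoided region, don't add this primer
--                 # if the end point of the primer is inside and avoided region, don't add this primer
--                 addPrimer = False
--         if addPrimer:
--             newprimers.append(primer)
--     return newprimers
-- ===== SOURCE B (Python) =====
-- def avoidedSeqsInOverlapRegions(seq, primers, seqsToAvoid, coordsOfAvoidedRegionsInSeq):
--     # Merge the avoided intervals once (sort by start, coalesce overlaps), then test
--     # each primer endpoint with a binary search over the merged, disjoint intervals.
--     ivs = sorted(coordsOfAvoidedRegionsInSeq, key=lambda iv: iv[0])
--     merged = []
--     cur = None
--     for s, e in ivs: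
--         if cur is None:
--             cur = (s, e)
--         elif s <= cur[1]:
--             if e > cur[1]:
--                 cur = (cur[0], e)
--         else:
--             merged.append(cur)
--             cur = (s, e)
--     if cur is not None:
--         merged.append(cur)
--     starts = [iv[0] for iv in merged]
--     ends = [iv[1] for iv in merged]
--
--     def covered(x):
--         lo, hi = 0, len(starts)
--         while lo < hi:
--             mid = (lo + hi) // 2
--             if starts[mid] <= x:
--                 lo = mid + 1
--             else:
--                 hi = mid
--         return lo > 0 and x <= ends[lo - 1]
--
--     return [p for p in primers if not covered(p[1][0]) and not covered(p[1][1])]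
-- ===== Notes on version B (the rewrite author's own statement) =====
-- stated objective: faster
-- what changed: Instead of testing every primer endpoint against every avoided interval, B sorts the intervals once, coalesces overlapping ones into a disjoint merged list, and decides each endpoint by binary search over the merged starts.
import Mathlib
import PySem

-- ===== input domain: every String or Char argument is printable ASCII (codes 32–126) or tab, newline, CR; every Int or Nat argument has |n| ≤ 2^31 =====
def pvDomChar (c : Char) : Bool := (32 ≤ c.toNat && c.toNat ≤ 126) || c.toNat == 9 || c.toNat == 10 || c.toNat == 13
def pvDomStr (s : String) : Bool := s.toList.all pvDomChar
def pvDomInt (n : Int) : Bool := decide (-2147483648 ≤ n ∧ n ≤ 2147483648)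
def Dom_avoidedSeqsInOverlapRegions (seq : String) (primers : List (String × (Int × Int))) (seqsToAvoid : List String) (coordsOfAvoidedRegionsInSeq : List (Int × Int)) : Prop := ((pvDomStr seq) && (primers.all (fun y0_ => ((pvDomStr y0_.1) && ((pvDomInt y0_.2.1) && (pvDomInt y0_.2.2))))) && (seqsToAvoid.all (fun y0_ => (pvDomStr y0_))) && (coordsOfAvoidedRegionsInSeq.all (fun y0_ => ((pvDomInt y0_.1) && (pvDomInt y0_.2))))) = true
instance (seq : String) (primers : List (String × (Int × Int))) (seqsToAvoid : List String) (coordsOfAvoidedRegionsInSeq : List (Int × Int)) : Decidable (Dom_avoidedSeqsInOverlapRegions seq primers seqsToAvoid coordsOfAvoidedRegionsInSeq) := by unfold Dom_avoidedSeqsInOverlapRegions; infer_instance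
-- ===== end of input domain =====

-- B replaces A's primer×region double scan by sort + interval merge + binary search per endpoint (asymptotically faster).

-- ===== PORT A =====
def avoidedSeqsInOverlapRegions (seq : String) (primers : List (String × (Int × Int))) (seqsToAvoid : List String) (coordsOfAvoidedRegionsInSeq : List (Int × Int)) : List (String × (Int × Int)) :=
  primers.foldl (fun newprimers primer =>
    let addPrimer := coordsOfAvoidedRegionsInSeq.foldl (fun addPrimer avoidedCoords =>
      if (primer.2.1 ≥ avoidedCoords.1 ∧ primer.2.1 ≤ avoidedCoords.2) ∨
         (primer.2.2 ≥ avoidedCoords.1 ∧ primer.2.2 ≤ avoidedCoords.2) then false else addPrimer) true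
    if addPrimer then newprimers ++ [primer] else newprimers) []

-- ===== PORT B =====
-- state of B's merging loop: (merged list built so far, current interval or None)
def pvMergeStep (st : List (Int × Int) × Option (Int × Int)) (iv : Int × Int) : List (Int × Int) × Option (Int × Int) :=
  match st.2 with
  | none => (st.1, some iv)
  | some cur =>
    if iv.1 ≤ cur.2 then
      if iv.2 > cur.2 then (st.1, some (cur.1, iv.2)) else (st.1, some cur)
    else (st.1 ++ [cur], some iv)

-- after the loop: 'if cur is not None: merged.append(cur)'
def pvFinish (st : List (Int × Int) × Option (Int × Int)) : List (Int × Int) :=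
  st.1 ++ (match st.2 with | some cur => [cur] | none => [])

-- B's 'while lo < hi' bisect loop; starts[mid] is always in range here, so getD is exact
def pvBisLoop (starts : List Int) (x : Int) (lo hi : Nat) : Nat :=
  if h : lo < hi then
    let mid := (lo + hi) / 2
    if starts.getD mid 0 ≤ x then pvBisLoop starts x (mid + 1) hi
    else pvBisLoop starts x lo mid
  else lo
termination_by hi - lo
decreasing_by all_goals omega

-- B's 'covered(x)': ends[lo-1] is in range whenever lo > 0, so getD is exact
def pvCovered (starts ends : List Int) (x : Int) : Bool :=
  let lo := pvBisLoop starts x 0 starts.length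
  decide (lo > 0) && decide (x ≤ ends.getD (lo - 1) 0)

def avoidedSeqsInOverlapRegions_alt (seq : String) (primers : List (String × (Int × Int))) (seqsToAvoid : List String) (coordsOfAvoidedRegionsInSeq : List (Int × Int)) : List (String × (Int × Int)) :=
  let ivs := PySem.List.sorted coordsOfAvoidedRegionsInSeq (fun iv => iv.1) false
  let merged := pvFinish (ivs.foldl pvMergeStep ([], none))
  let starts := merged.map (fun iv => iv.1)
  let ends := merged.map (fun iv => iv.2)
  primers.filter (fun p => !pvCovered starts ends p.2.1 && !pvCovered starts ends p.2.2)

-- ===== PRECONDITION & SPEC =====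
def Spec_avoidedSeqsInOverlapRegions (seq : String) (primers : List (String × (Int × Int))) (seqsToAvoid : List String) (coordsOfAvoidedRegionsInSeq : List (Int × Int)) (out : List (String × (Int × Int))) : Prop := out = avoidedSeqsInOverlapRegions_alt seq primers seqsToAvoid coordsOfAvoidedRegionsInSeq
instance (seq : String) (primers : List (String × (Int × Int))) (seqsToAvoid : List String) (coordsOfAvoidedRegionsInSeq : List (Int × Int)) (out : List (String × (Int × Int))) : Decidable (Spec_avoidedSeqsInOverlapRegions seq primers seqsToAvoid coordsOfAvoidedRegionsInSeq out) := by unfold Spec_avoidedSeqsInOverlapRegions; infer_instance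

-- ===== CLAIM (what is proved, stated in full; the proofs are below) =====
def Claim_equal_avoidedSeqsInOverlapRegions : Prop := ∀ (seq : String) (primers : List (String × (Int × Int))) (seqsToAvoid : List String) (coordsOfAvoidedRegionsInSeq : List (Int × Int)), Dom_avoidedSeqsInOverlapRegions seq primers seqsToAvoid coordsOfAvoidedRegionsInSeq → Spec_avoidedSeqsInOverlapRegions seq primers seqsToAvoid coordsOfAvoidedRegionsInSeq (avoidedSeqsInOverlapRegions seq primers seqsToAvoid coordsOfAvoidedRegionsInSeq)

-- ===== LEMMAS AND PROOFS =====

-- 'x is inside some interval of l'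
def pvCov (l : List (Int × Int)) (x : Int) : Prop := ∃ iv ∈ l, iv.1 ≤ x ∧ x ≤ iv.2

-- structural view of the merging loop once the current interval is set
def pvGo (s e : Int) : List (Int × Int) → List (Int × Int)
  | [] => [(s, e)]
  | iv :: t => if iv.1 ≤ e then pvGo s (if iv.2 > e then iv.2 else e) t else (s, e) :: pvGo iv.1 iv.2 t

theorem pvFold_eq_go : ∀ (l : List (Int × Int)) (acc : List (Int × Int)) (s e : Int),
    pvFinish (l.foldl pvMergeStep (acc, some (s, e))) = acc ++ pvGo s e l := by
  intro l
  induction l with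
  | nil => intro acc s e; simp [pvFinish, pvGo]
  | cons iv t ih =>
    intro acc s e
    simp only [List.foldl_cons, pvMergeStep, pvGo]
    by_cases h1 : iv.1 ≤ e
    · by_cases h2 : iv.2 > e
      · simp [h1, h2, ih]
      · simp [h1, h2, ih]
    · simp [h1, ih]

theorem pvGo_cov (x : Int) : ∀ (t : List (Int × Int)) (s e : Int),
    (∀ iv ∈ t, s ≤ iv.1) → t.Pairwise (fun a b => a.1 ≤ b.1) →
    (pvCov (pvGo s e t) x ↔ (s ≤ x ∧ x ≤ e) ∨ pvCov t x) := by
  intro t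
  induction t with
  | nil => intro s e _ _; simp [pvGo, pvCov]
  | cons iv t ih =>
    intro s e hle hp
    rw [List.pairwise_cons] at hp
    have hsiv : s ≤ iv.1 := hle iv (by simp)
    have hst : ∀ iv' ∈ t, s ≤ iv'.1 := fun iv' h => hle iv' (by simp [h])
    simp only [pvGo]
    by_cases h1 : iv.1 ≤ e
    · by_cases h2 : iv.2 > e
      · rw [if_pos h1, if_pos h2, ih s iv.2 hst hp.2]
        constructor
        · rintro (⟨hx1, hx2⟩ | hc)
          · by_cases hxe : x ≤ e
            · exact Or.inl ⟨hx1, hxe⟩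
            · exact Or.inr ⟨iv, by simp, by omega, hx2⟩
          · rcases hc with ⟨iv', hiv', hx⟩
            exact Or.inr ⟨iv', by simp [hiv'], hx⟩
        · rintro (⟨hx1, hx2⟩ | ⟨iv', hiv', hx1, hx2⟩)
          · exact Or.inl ⟨hx1, by omega⟩
          · rcases List.mem_cons.mp hiv' with rfl | hmem
            · exact Or.inl ⟨by omega, by omega⟩
            · exact Or.inr ⟨iv', hmem, hx1, hx2⟩
      · rw [if_pos h1, if_neg h2, ih s e hst hp.2]
        constructor
        · rintro (h | hc)
          · exact Or.inl h
          · rcases hc with ⟨iv', hiv', hx⟩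
            exact Or.inr ⟨iv', by simp [hiv'], hx⟩
        · rintro (h | ⟨iv', hiv', hx1, hx2⟩)
          · exact Or.inl h
          · rcases List.mem_cons.mp hiv' with rfl | hmem
            · exact Or.inl ⟨by omega, by omega⟩
            · exact Or.inr ⟨iv', hmem, hx1, hx2⟩
    · rw [if_neg h1]
      have := ih iv.1 iv.2 (fun iv' h => hp.1 iv' h) hp.2
      simp only [pvCov] at *
      constructor
      · rintro ⟨iv', hiv', hx⟩
        rcases List.mem_cons.mp hiv' with rfl | hmem
        · exact Or.inl hx
        · rcases (this.mp ⟨iv', hmem, hx⟩) with h | ⟨j, hj, hx'⟩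
          · exact Or.inr ⟨iv, by simp, h⟩
          · exact Or.inr ⟨j, by simp [hj], hx'⟩
      · rintro (h | ⟨iv', hiv', hx⟩)
        · exact ⟨(s, e), by simp, h⟩
        · rcases List.mem_cons.mp hiv' with rfl | hmem
          · rcases this.mpr (Or.inl hx) with ⟨j, hj, hx'⟩
            exact ⟨j, by simp [hj], hx'⟩
          · rcases this.mpr (Or.inr ⟨iv', hmem, hx⟩) with ⟨j, hj, hx'⟩
            exact ⟨j, by simp [hj], hx'⟩

theorem pvGo_head : ∀ (t : List (Int × Int)) (s e : Int),
    ∃ e' r, pvGo s e t = (s, e') :: r ∧ e ≤ e' := by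
  intro t
  induction t with
  | nil => intro s e; exact ⟨e, [], rfl, le_refl _⟩
  | cons iv t ih =>
    intro s e
    simp only [pvGo]
    by_cases h1 : iv.1 ≤ e
    · by_cases h2 : iv.2 > e
      · rcases ih s iv.2 with ⟨e', r, heq, hle⟩
        exact ⟨e', r, by simp [h1, h2, heq], by omega⟩
      · rcases ih s e with ⟨e', r, heq, hle⟩
        exact ⟨e', r, by simp [h1, h2, heq], hle⟩
    · exact ⟨e, pvGo iv.1 iv.2 t, by simp [h1], le_refl _⟩

theorem pvGo_inv : ∀ (t : List (Int × Int)) (s e : Int),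
    (∀ iv ∈ t, s ≤ iv.1) → t.Pairwise (fun a b => a.1 ≤ b.1) →
    (∀ iv ∈ pvGo s e t, s ≤ iv.1) ∧
    (pvGo s e t).Pairwise (fun a b => a.1 ≤ b.1) ∧
    (pvGo s e t).IsChain (fun a b => a.2 < b.1) := by
  intro t
  induction t with
  | nil => intro s e _ _; simp [pvGo]
  | cons iv t ih =>
    intro s e hle hp
    rw [List.pairwise_cons] at hp
    have hsiv : s ≤ iv.1 := hle iv (by simp)
    have hst : ∀ iv' ∈ t, s ≤ iv'.1 := fun iv' h => hle iv' (by simp [h])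
    simp only [pvGo]
    by_cases h1 : iv.1 ≤ e
    · by_cases h2 : iv.2 > e
      · simpa [h1, h2] using ih s iv.2 hst hp.2
      · simpa [h1, h2] using ih s e hst hp.2
    · rw [if_neg h1]
      have hiv1 : ∀ iv' ∈ t, iv.1 ≤ iv'.1 := fun iv' h => hp.1 iv' h
      rcases ih iv.1 iv.2 hiv1 hp.2 with ⟨hmem, hpw, hch⟩
      refine ⟨?_, ?_, ?_⟩
      · intro iv' hiv'
        rcases List.mem_cons.mp hiv' with rfl | hmem'
        · exact le_refl _
        · exact le_trans hsiv (hmem iv' hmem')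
      · exact List.pairwise_cons.mpr ⟨fun iv' h => le_trans hsiv (hmem iv' h), hpw⟩
      · rcases pvGo_head t iv.1 iv.2 with ⟨e', r, heq, _⟩
        rw [heq]
        rw [heq] at hch
        exact List.isChain_cons_cons.mpr ⟨by show e < iv.1; omega, hch⟩

-- bisect_right invariant: the loop returns the count boundary of 'starts[i] ≤ x'
theorem pvBisLoop_spec (starts : List Int) (x : Int)
    (hmono : ∀ i j, i ≤ j → j < starts.length → starts.getD i 0 ≤ starts.getD j 0) :
    ∀ (n lo hi : Nat), hi - lo ≤ n → lo ≤ hi → hi ≤ starts.length →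
    (∀ i, i < lo → starts.getD i 0 ≤ x) →
    (∀ i, hi ≤ i → i < starts.length → x < starts.getD i 0) →
    (∀ i, i < pvBisLoop starts x lo hi → starts.getD i 0 ≤ x) ∧
    (∀ i, pvBisLoop starts x lo hi ≤ i → i < starts.length → x < starts.getD i 0) ∧
    lo ≤ pvBisLoop starts x lo hi ∧ pvBisLoop starts x lo hi ≤ hi := by
  intro n
  induction n with
  | zero =>
    intro lo hi hn hlh _ hlow hhigh
    have : lo = hi := by omega
    subst this
    rw [pvBisLoop, dif_neg (by omega)]
    exact ⟨hlow, hhigh, le_refl _, le_refl _⟩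
  | succ n ih =>
    intro lo hi hn hlh hhil hlow hhigh
    by_cases h : lo < hi
    · rw [pvBisLoop, dif_pos h]
      set mid := (lo + hi) / 2 with hmid
      have hmlt : mid < hi := by omega
      have hmge : lo ≤ mid := by omega
      by_cases hc : starts.getD mid 0 ≤ x
      · rw [if_pos hc]
        obtain ⟨h1, h2, h3, h4⟩ := ih (mid + 1) hi (by omega) (by omega) hhil
          (fun i hi' => le_trans (hmono i mid (by omega) (by omega)) hc) hhigh
        exact ⟨h1, h2, by omega, h4⟩
      · rw [if_neg hc]
        obtain ⟨h1, h2, h3, h4⟩ := ih lo mid (by omega) (by omega) (by omega) hlow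
          (fun i hmi hil => lt_of_not_ge (fun hcon => hc (le_trans (hmono mid i hmi hil) hcon)))
        exact ⟨h1, h2, h3, by omega⟩
    · rw [pvBisLoop, dif_neg h]
      have : lo = hi := by omega
      subst this
      exact ⟨hlow, hhigh, le_refl _, le_refl _⟩

theorem pvCovered_iff (m : List (Int × Int)) (x : Int)
    (hpw : m.Pairwise (fun a b => a.1 ≤ b.1))
    (hch : m.IsChain (fun a b => a.2 < b.1)) :
    pvCovered (m.map (fun iv => iv.1)) (m.map (fun iv => iv.2)) x = true ↔ pvCov m x := by
  set starts := m.map (fun iv : Int × Int => iv.1) with hs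
  set ends := m.map (fun iv : Int × Int => iv.2) with he
  have hlen : starts.length = m.length := by simp [hs]
  have hlene : ends.length = m.length := by simp [he]
  have hget : ∀ i, i < m.length → starts.getD i 0 = (m.getD i (0,0)).1 := by
    intro i hi
    rw [List.getD_eq_getElem _ _ (by omega), List.getD_eq_getElem _ _ (by omega)]
    simp [hs]
  have hgete : ∀ i, i < m.length → ends.getD i 0 = (m.getD i (0,0)).2 := by
    intro i hi
    rw [List.getD_eq_getElem _ _ (by omega), List.getD_eq_getElem _ _ (by omega)]
    simp [he]
  have hpw' : ∀ i j, i ≤ j → j < m.length → (m.getD i (0,0)).1 ≤ (m.getD j (0,0)).1 := by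
    intro i j hij hj
    rcases Nat.eq_or_lt_of_le hij with rfl | hlt
    · exact le_refl _
    · rw [List.getD_eq_getElem _ _ (by omega), List.getD_eq_getElem _ _ (by omega)]
      exact List.pairwise_iff_getElem.mp hpw i j (by omega) (by omega) hlt
  have hmono : ∀ i j, i ≤ j → j < starts.length → starts.getD i 0 ≤ starts.getD j 0 := by
    intro i j hij hj
    rw [hget i (by omega), hget j (by omega)]
    exact hpw' i j hij (by omega)
  have hsep : ∀ i, i + 1 < m.length → (m.getD i (0,0)).2 < (m.getD (i+1) (0,0)).1 := by
    intro i hi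
    rw [List.getD_eq_getElem _ _ (by omega), List.getD_eq_getElem _ _ (by omega)]
    exact List.isChain_iff_getElem.mp hch i (by omega)
  set r := pvBisLoop starts x 0 starts.length with hr
  have hspec := pvBisLoop_spec starts x hmono starts.length 0 starts.length
    (by omega) (by omega) (le_refl _) (by omega) (by intro i h1 h2; omega)
  rcases hspec with ⟨hlow, hgt, _, hrle⟩
  rw [show pvCovered starts ends x = (decide (r > 0) && decide (x ≤ ends.getD (r - 1) 0)) from rfl]
  constructor
  · intro hcov
    simp only [Bool.and_eq_true, decide_eq_true_eq] at hcov
    rcases hcov with ⟨hr0, hxe⟩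
    refine ⟨m.getD (r-1) (0,0), ?_, ?_, ?_⟩
    · have : r - 1 < m.length := by omega
      rw [List.getD_eq_getElem _ _ this]; exact List.getElem_mem _
    · rw [← hget (r-1) (by omega)]; exact hlow (r-1) (by omega)
    · rw [← hgete (r-1) (by omega)]; exact hxe
  · rintro ⟨iv, hiv, hx1, hx2⟩
    rcases List.getElem_of_mem hiv with ⟨i, hilt, rfl⟩
    have hgi : m.getD i (0,0) = m[i] := List.getD_eq_getElem _ _ hilt
    have hir : i < r := by
      by_contra hcon
      have := hgt i (by omega) (by omega)
      rw [hget i hilt, hgi] at this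
      omega
    have hr0 : 0 < r := by omega
    have hxe : x ≤ ends.getD (r - 1) 0 := by
      rw [hgete (r-1) (by omega)]
      by_cases hieq : i = r - 1
      · subst hieq; rw [hgi]; exact hx2
      · exfalso
        have hi1 : i + 1 ≤ r - 1 := by omega
        have h1 : (m.getD i (0,0)).2 < (m.getD (i+1) (0,0)).1 := hsep i (by omega)
        have h2 : (m.getD (i+1) (0,0)).1 ≤ (m.getD (r-1) (0,0)).1 := hpw' (i+1) (r-1) hi1 (by omega)
        have h3 : starts.getD (r-1) 0 ≤ x := hlow (r-1) (by omega)
        rw [hget (r-1) (by omega)] at h3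
        rw [hgi] at h1
        omega
    simp only [Bool.and_eq_true, decide_eq_true_eq]
    exact ⟨hr0, hxe⟩

-- A's inner flag loop computes '¬ any hit'
theorem pvFlag_eq (xs ys : Int) : ∀ (l : List (Int × Int)) (b : Bool),
    l.foldl (fun addPrimer ac =>
      if (xs ≥ ac.1 ∧ xs ≤ ac.2) ∨ (ys ≥ ac.1 ∧ ys ≤ ac.2) then false else addPrimer) b
    = (b && !(l.any (fun ac => decide ((ac.1 ≤ xs ∧ xs ≤ ac.2) ∨ (ac.1 ≤ ys ∧ ys ≤ ac.2))))) := by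
  intro l
  induction l with
  | nil => intro b; simp
  | cons ac t ih =>
    intro b
    simp only [List.foldl_cons, List.any_cons, ih]
    by_cases h : (xs ≥ ac.1 ∧ xs ≤ ac.2) ∨ (ys ≥ ac.1 ∧ ys ≤ ac.2)
    · rw [if_pos h]
      have : decide ((ac.1 ≤ xs ∧ xs ≤ ac.2) ∨ (ac.1 ≤ ys ∧ ys ≤ ac.2)) = true := by
        simp only [decide_eq_true_eq]; omega
      simp [this]
    · rw [if_neg h]
      have : decide ((ac.1 ≤ xs ∧ xs ≤ ac.2) ∨ (ac.1 ≤ ys ∧ ys ≤ ac.2)) = false := by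
        simp only [decide_eq_false_iff_not]; omega
      simp [this]

-- running the merge loop on a start-sorted list: invariants and exact coverage
theorem pvMergedRun (ivs : List (Int × Int)) (hpw : ivs.Pairwise (fun a b => a.1 ≤ b.1)) :
    (pvFinish (ivs.foldl pvMergeStep ([], none))).Pairwise (fun a b => a.1 ≤ b.1) ∧
    (pvFinish (ivs.foldl pvMergeStep ([], none))).IsChain (fun a b => a.2 < b.1) ∧
    (∀ x, pvCov (pvFinish (ivs.foldl pvMergeStep ([], none))) x ↔ pvCov ivs x) := by
  cases ivs with
  | nil => simp [pvFinish, pvCov]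
  | cons iv t =>
    rw [List.pairwise_cons] at hpw
    have hmerged : pvFinish ((iv :: t).foldl pvMergeStep ([], none)) = pvGo iv.1 iv.2 t := by
      simp only [List.foldl_cons, pvMergeStep]
      exact pvFold_eq_go t [] iv.1 iv.2
    have hle : ∀ iv' ∈ t, iv.1 ≤ iv'.1 := fun iv' h => hpw.1 iv' h
    rcases pvGo_inv t iv.1 iv.2 hle hpw.2 with ⟨_, hpw', hch'⟩
    rw [hmerged]
    refine ⟨hpw', hch', fun x => ?_⟩
    rw [pvGo_cov x t iv.1 iv.2 hle hpw.2]
    unfold pvCov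
    constructor
    · rintro (h | ⟨j, hj, hx⟩)
      · exact ⟨iv, by simp, h⟩
      · exact ⟨j, by simp [hj], hx⟩
    · rintro ⟨j, hj, hx⟩
      rcases List.mem_cons.mp hj with rfl | hmem
      · exact Or.inl hx
      · exact Or.inr ⟨j, hmem, hx⟩

-- Bool form of coverage of the raw interval list
def pvHit (l : List (Int × Int)) (x : Int) : Bool :=
  l.any (fun ac => decide (ac.1 ≤ x ∧ x ≤ ac.2))

theorem pvHit_iff (l : List (Int × Int)) (x : Int) : pvHit l x = true ↔ pvCov l x := by
  simp [pvHit, pvCov]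

theorem pvAny_split (x y : Int) : ∀ l : List (Int × Int),
    l.any (fun ac => decide ((ac.1 ≤ x ∧ x ≤ ac.2) ∨ (ac.1 ≤ y ∧ y ≤ ac.2)))
      = (pvHit l x || pvHit l y) := by
  intro l
  induction l with
  | nil => simp [pvHit]
  | cons ac t ih =>
    simp only [List.any_cons, ih, pvHit]
    by_cases h1 : (ac.1 ≤ x ∧ x ≤ ac.2) <;> by_cases h2 : (ac.1 ≤ y ∧ y ≤ ac.2) <;>
      simp [h1, h2, Bool.or_comm]

-- ===== VERDICT (by name: the statement is the Claim_ definition above) =====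
theorem avoidedSeqsInOverlapRegions_spec : Claim_equal_avoidedSeqsInOverlapRegions := by
  intro seq primers seqsToAvoid coords _
  unfold Spec_avoidedSeqsInOverlapRegions
  unfold avoidedSeqsInOverlapRegions avoidedSeqsInOverlapRegions_alt
  have hperm : (PySem.List.sorted coords (fun iv => iv.1) false).Perm coords :=
    PySem.List.sorted_perm coords (fun iv => iv.1) false
  rcases pvMergedRun (PySem.List.sorted coords (fun iv => iv.1) false)
      (PySem.List.sorted_pairwise coords (fun iv => iv.1)) with ⟨hpw, hch, hcov⟩
  set merged := pvFinish ((PySem.List.sorted coords (fun iv => iv.1) false).foldl pvMergeStep ([], none)) with hm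
  have hcovd : ∀ x : Int,
      pvCovered (merged.map (fun iv => iv.1)) (merged.map (fun iv => iv.2)) x = pvHit coords x := by
    intro x
    rw [Bool.eq_iff_iff, pvCovered_iff merged x hpw hch, hcov x, pvHit_iff]
    unfold pvCov
    constructor
    · rintro ⟨iv, h, hx⟩; exact ⟨iv, hperm.mem_iff.mp h, hx⟩
    · rintro ⟨iv, h, hx⟩; exact ⟨iv, hperm.mem_iff.mpr h, hx⟩
  rw [PySem.List.foldl_append_ite_eq_filter]
  simp only [List.nil_append]
  apply List.filter_congr
  intro p _
  rw [pvFlag_eq p.2.1 p.2.2 coords true, Bool.true_and, hcovd p.2.1, hcovd p.2.2]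
  rw [pvAny_split p.2.1 p.2.2 coords]
  cases pvHit coords p.2.1 <;> cases pvHit coords p.2.2 <;> rfl
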